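-- pv_equiv track=rewrite | github.com/lucasdsaints/primeiro_trabalho_ori | app.py | getDocsConsultaAndNot
-- ===== SOURCE A (Python) =====
-- def getDocsConsultaAndNot(consulta, indice, num_docs):
-- 	ids_docs = []
-- 	for i in range (0,num_docs):
-- 		ids_docs.append(i + 1)
-- 	for radical in consulta:
-- 		docs_indice = indice[radical].keys()
-- 		if consulta[radical] == 1:
-- 			ids_docs = [id for id in ids_docs if id in docs_indice]
-- 		else:
-- 			ids_docs = [id for id in ids_docs if id not in docs_indice]
--
-- 	return ids_docs
-- ===== SOURCE B (Python) =====
-- def getDocsConsultaAndNot(consulta, indice, num_docs):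
--     required = None          # None = no AND radical yet (full universe)
--     excluded = set()
--     for radical, val in consulta.items():
--         keys = set(indice[radical].keys())
--         if val == 1:
--             required = keys if required is None else required & keys
--         else:
--             excluded |= keys
--     return [i for i in range(1, num_docs + 1)
--             if (required is None or i in required) and i not in excluded]
-- ===== Notes on version B (the rewrite author's own statement) =====
-- stated objective: alternative
-- what changed: Instead of repeatedly re-filtering the whole id list once per radical, B folds the query once into two sets (required = intersection of the AND-radical key sets, or the full universe when there are none; excluded = union of the NOT-radical key sets) and then makes a single membership pass over range(1, num_docs+1).
import Mathlib
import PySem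

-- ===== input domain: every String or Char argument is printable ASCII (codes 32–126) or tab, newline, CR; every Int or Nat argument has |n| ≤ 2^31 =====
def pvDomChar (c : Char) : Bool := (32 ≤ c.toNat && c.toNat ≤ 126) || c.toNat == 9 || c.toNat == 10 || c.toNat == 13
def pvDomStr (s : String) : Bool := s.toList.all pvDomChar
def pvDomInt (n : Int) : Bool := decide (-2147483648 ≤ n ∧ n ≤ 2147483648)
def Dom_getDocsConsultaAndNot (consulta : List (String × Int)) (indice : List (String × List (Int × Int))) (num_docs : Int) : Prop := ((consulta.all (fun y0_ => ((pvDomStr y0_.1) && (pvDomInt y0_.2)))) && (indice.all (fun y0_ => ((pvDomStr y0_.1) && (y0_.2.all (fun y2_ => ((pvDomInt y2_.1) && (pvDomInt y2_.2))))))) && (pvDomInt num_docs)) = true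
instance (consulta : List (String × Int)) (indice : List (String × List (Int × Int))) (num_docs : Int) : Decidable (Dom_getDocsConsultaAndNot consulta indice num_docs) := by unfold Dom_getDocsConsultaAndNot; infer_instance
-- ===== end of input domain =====

-- B replaces A's repeated per-radical re-filtering of the id list by one fold building a
-- required-intersection set and an excluded-union set, then a single pass over the id range.

-- ===== PORT A =====
-- indice[radical].keys() (total under Pre_: radical is a key of indice)
def pvKeysOf (indice : List (String × List (Int × Int))) (radical : String) : List Int :=
  (PySem.Dict.ofList ((PySem.Dict.ofList indice).getD radical [])).keys

def getDocsConsultaAndNot (consulta : List (String × Int)) (indice : List (String × List (Int × Int))) (num_docs : Int) : List Int :=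
  (PySem.Dict.ofList consulta).items.foldl
    (fun ids_docs (rv : String × Int) =>
      let docs_indice := pvKeysOf indice rv.1
      if rv.2 == 1 then ids_docs.filter (fun id => docs_indice.contains id)
      else ids_docs.filter (fun id => !docs_indice.contains id))
    ((PySem.List.pyRange 0 num_docs 1).foldl (fun acc i => acc ++ [i + 1]) [])

-- ===== PORT B =====
-- the final single pass: one filter of range(1, num_docs+1) against (required, excluded)
def pvAltFilter (st : Option (PySem.Set Int) × PySem.Set Int) (num_docs : Int) : List Int :=
  (PySem.List.pyRange 1 (num_docs + 1) 1).filter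
    (fun i => (match st.1 with | none => true | some r => PySem.Set.contains r i) && !(PySem.Set.contains st.2 i))

def getDocsConsultaAndNot_alt (consulta : List (String × Int)) (indice : List (String × List (Int × Int))) (num_docs : Int) : List Int :=
  pvAltFilter
    ((PySem.Dict.ofList consulta).items.foldl
      (fun (st : Option (PySem.Set Int) × PySem.Set Int) (rv : String × Int) =>
        let keys : PySem.Set Int := PySem.Set.ofList (pvKeysOf indice rv.1)
        if rv.2 == 1 then
          ((match st.1 with | none => some keys | some r => some (PySem.Set.inter r keys)), st.2)
        else (st.1, PySem.Set.union st.2 keys))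
      ((none : Option (PySem.Set Int)), (PySem.Set.empty : PySem.Set Int)))
    num_docs

-- ===== PRECONDITION & SPEC =====
-- Pre_ excludes exactly the inputs where Python A raises KeyError: a query radical missing from indice.
def Pre_getDocsConsultaAndNot (consulta : List (String × Int)) (indice : List (String × List (Int × Int))) (num_docs : Int) : Prop :=
  ∀ p ∈ consulta, p.1 ∈ indice.map Prod.fst
instance (consulta : List (String × Int)) (indice : List (String × List (Int × Int))) (num_docs : Int) : Decidable (Pre_getDocsConsultaAndNot consulta indice num_docs) := by unfold Pre_getDocsConsultaAndNot; infer_instance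

def pvWitness_getDocsConsultaAndNot : (List (String × Int)) × (List (String × List (Int × Int))) × Int :=
  ([("ab", 1), ("cd", 0)], [("ab", [(1, 2), (3, 1)]), ("cd", [(3, 1)])], 4)

def Spec_getDocsConsultaAndNot (consulta : List (String × Int)) (indice : List (String × List (Int × Int))) (num_docs : Int) (out : List Int) : Prop := out = getDocsConsultaAndNot_alt consulta indice num_docs
instance (consulta : List (String × Int)) (indice : List (String × List (Int × Int))) (num_docs : Int) (out : List Int) : Decidable (Spec_getDocsConsultaAndNot consulta indice num_docs out) := by unfold Spec_getDocsConsultaAndNot; infer_instance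

-- ===== CLAIM (what is proved, stated in full; the proofs are below) =====
def Claim_equal_getDocsConsultaAndNot : Prop := ∀ (consulta : List (String × Int)) (indice : List (String × List (Int × Int))) (num_docs : Int), Dom_getDocsConsultaAndNot consulta indice num_docs → Pre_getDocsConsultaAndNot consulta indice num_docs → Spec_getDocsConsultaAndNot consulta indice num_docs (getDocsConsultaAndNot consulta indice num_docs)

-- ===== LEMMAS AND PROOFS =====

-- one radical's test on one id
def pvPass (indice : List (String × List (Int × Int))) (rv : String × Int) (i : Int) : Bool :=
  if rv.2 == 1 then (pvKeysOf indice rv.1).contains i else !(pvKeysOf indice rv.1).contains i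

theorem pvA_foldl (indice : List (String × List (Int × Int))) (L : List (String × Int)) :
    ∀ ids : List Int,
      L.foldl (fun ids_docs (rv : String × Int) =>
          let docs_indice := pvKeysOf indice rv.1
          if rv.2 == 1 then ids_docs.filter (fun id => docs_indice.contains id)
          else ids_docs.filter (fun id => !docs_indice.contains id)) ids
        = ids.filter (fun i => L.all (fun rv => pvPass indice rv i)) := by
  induction L with
  | nil => intro ids; simp
  | cons rv L ih =>
    intro ids
    have hstep :
        (let docs_indice := pvKeysOf indice rv.1
         if rv.2 == 1 then ids.filter (fun id => docs_indice.contains id)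
         else ids.filter (fun id => !docs_indice.contains id))
          = ids.filter (fun i => pvPass indice rv i) := by
      by_cases h : rv.2 == 1 <;> simp [pvPass, h]
    rw [List.foldl_cons, hstep, ih, List.filter_filter]
    apply List.filter_congr
    intro x _
    simp [Bool.and_comm]

def pvCheck (st : Option (PySem.Set Int) × PySem.Set Int) (i : Int) : Bool :=
  (match st.1 with | none => true | some r => PySem.Set.contains r i) && !(PySem.Set.contains st.2 i)

theorem pvB_foldl (indice : List (String × List (Int × Int))) (L : List (String × Int)) (i : Int) :
    ∀ st : Option (PySem.Set Int) × PySem.Set Int,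
      pvCheck (L.foldl
        (fun (st : Option (PySem.Set Int) × PySem.Set Int) (rv : String × Int) =>
          let keys : PySem.Set Int := PySem.Set.ofList (pvKeysOf indice rv.1)
          if rv.2 == 1 then
            ((match st.1 with | none => some keys | some r => some (PySem.Set.inter r keys)), st.2)
          else (st.1, PySem.Set.union st.2 keys)) st) i
      = (pvCheck st i && L.all (fun rv => pvPass indice rv i)) := by
  induction L with
  | nil => intro st; simp
  | cons rv L ih =>
    intro st
    rw [List.foldl_cons, ih]
    have hstep :
        pvCheck (let keys : PySem.Set Int := PySem.Set.ofList (pvKeysOf indice rv.1)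
          if rv.2 == 1 then
            ((match st.1 with | none => some keys | some r => some (PySem.Set.inter r keys)), st.2)
          else (st.1, PySem.Set.union st.2 keys)) i
          = (pvCheck st i && pvPass indice rv i) := by
      by_cases h : rv.2 == 1
      · rcases st with ⟨req, exc⟩
        cases req with
        | none =>
          simp only [pvCheck, pvPass, h, if_pos]
          simp [PySem.Set.mem_ofList, Bool.and_comm, Bool.and_left_comm, Bool.and_assoc]
        | some r =>
          simp only [pvCheck, pvPass, h, if_pos]
          simp [PySem.Set.mem_inter, PySem.Set.mem_ofList, Bool.and_comm, Bool.and_left_comm, Bool.and_assoc]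
      · rcases st with ⟨req, exc⟩
        simp only [pvCheck, pvPass, h]
        simp [PySem.Set.mem_union, PySem.Set.mem_ofList, Bool.and_comm, Bool.and_left_comm, Bool.and_assoc]
    rw [hstep]
    simp [Bool.and_left_comm, Bool.and_assoc]

theorem pvRange_shift (n : Int) :
    (PySem.List.pyRange 0 n 1).map (fun i => i + 1) = PySem.List.pyRange 1 (n + 1) 1 := by
  simp [PySem.List.pyRange_one, List.map_map]
  intro a _
  omega

-- ===== VERDICT (by name: the statement is the Claim_ definition above) =====
theorem getDocsConsultaAndNot_spec : Claim_equal_getDocsConsultaAndNot := by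
  intro consulta indice num_docs _ _
  unfold Spec_getDocsConsultaAndNot getDocsConsultaAndNot getDocsConsultaAndNot_alt pvAltFilter
  rw [PySem.List.foldl_append_singleton_eq_map, List.nil_append, pvRange_shift,
    pvA_foldl]
  apply List.filter_congr
  intro i _
  have h := pvB_foldl indice (PySem.Dict.ofList consulta).items i
    ((none : Option (PySem.Set Int)), (PySem.Set.empty : PySem.Set Int))
  simp only [pvCheck, PySem.Set.empty, List.contains_nil, Bool.not_false,
    Bool.true_and, Bool.and_true] at h
  exact h.symm
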